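-- pv_equiv track=rewrite | github.com/JanBellingrath/inference-time-program-selection-for-transformer-models | data_prep/build_assign_increment_catalog.py | _decomposition_summary
-- ===== SOURCE A (Python) =====
-- from typing import Any, Dict, Iterable, List, Optional, Sequence, Set, Tuple
--
-- def _decomposition_summary(provenance: Sequence[Dict[str, Any]]) -> Dict[str, int]:
--     n_pure_assign_only = 0  # only producing programs are pure-assign
--     n_mixed_only = 0        # only producing programs are mixed
--     n_either = 0            # at least one pure-assign and at least one mixed
--     n_struct_only = 0       # bug guard: should be 0 by definition (delta only)
--     for row in provenance:
--         pa = bool(row.get("any_pure_assign_program"))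
--         mx = bool(row.get("any_mixed_program"))
--         ps = bool(row.get("any_pure_struct_program"))
--         if ps and not (pa or mx):
--             n_struct_only += 1
--         elif pa and mx:
--             n_either += 1
--         elif pa:
--             n_pure_assign_only += 1
--         elif mx:
--             n_mixed_only += 1
--     return {
--         "delta_routes_pure_assign_only": n_pure_assign_only,
--         "delta_routes_mixed_only": n_mixed_only,
--         "delta_routes_with_both_pure_and_mixed": n_either,
--         "delta_routes_struct_only_unexpected": n_struct_only,
--     }
-- ===== SOURCE B (Python) =====
-- def _decomposition_summary(provenance):
--     flags = [(bool(row.get("any_pure_assign_program")),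
--               bool(row.get("any_mixed_program")),
--               bool(row.get("any_pure_struct_program"))) for row in provenance]
--     return {
--         "delta_routes_pure_assign_only": sum(1 for pa, mx, ps in flags if pa and not mx),
--         "delta_routes_mixed_only": sum(1 for pa, mx, ps in flags if mx and not pa),
--         "delta_routes_with_both_pure_and_mixed": sum(1 for pa, mx, ps in flags if pa and mx),
--         "delta_routes_struct_only_unexpected": sum(1 for pa, mx, ps in flags if ps and not pa and not mx),
--     }
-- ===== Notes on version B (the rewrite author's own statement) =====
-- stated objective: simpler
-- what changed: Replaces the single precedence-ordered if/elif loop over four mutable counters with four independent predicate counts (pa&!mx, mx&!pa, pa&mx, ps&!pa&!mx) over per-row flag triples.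
import Mathlib
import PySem

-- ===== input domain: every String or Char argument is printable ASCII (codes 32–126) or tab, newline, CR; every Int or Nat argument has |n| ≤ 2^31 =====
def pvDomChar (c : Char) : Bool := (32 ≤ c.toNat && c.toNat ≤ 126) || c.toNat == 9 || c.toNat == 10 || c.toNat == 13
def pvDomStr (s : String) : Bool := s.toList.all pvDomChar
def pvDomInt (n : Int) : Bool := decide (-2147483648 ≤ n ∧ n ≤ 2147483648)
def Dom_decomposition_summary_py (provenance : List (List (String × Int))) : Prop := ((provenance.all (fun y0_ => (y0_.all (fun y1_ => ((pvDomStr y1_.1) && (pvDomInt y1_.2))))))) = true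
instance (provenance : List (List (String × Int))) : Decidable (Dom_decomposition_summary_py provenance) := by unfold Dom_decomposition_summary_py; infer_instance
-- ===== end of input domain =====

-- ===== PORT A =====
-- B changes only the return value's computation strategy; no mutation concerns.
-- bool(row.get(k)): truthy iff the key is present with a nonzero value (first match in the assoc list).
def pvTruthy (row : List (String × Int)) (k : String) : Bool :=
  ((PySem.Dict.mk row).getD k 0) != 0

-- A's loop body, named so the fold lemma can cite it
def pvStepA (st : Int × Int × Int × Int) (row : List (String × Int)) : Int × Int × Int × Int :=
  let pa := pvTruthy row "any_pure_assign_program"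
  let mx := pvTruthy row "any_mixed_program"
  let ps := pvTruthy row "any_pure_struct_program"
  if ps && !(pa || mx) then (st.1, st.2.1, st.2.2.1, st.2.2.2 + 1)
  else if pa && mx then (st.1, st.2.1, st.2.2.1 + 1, st.2.2.2)
  else if pa then (st.1 + 1, st.2.1, st.2.2.1, st.2.2.2)
  else if mx then (st.1, st.2.1 + 1, st.2.2.1, st.2.2.2)
  else st

-- literal port of A: one pass, if/elif precedence chain over four counters
def decomposition_summary_py (provenance : List (List (String × Int))) : List (String × Int) :=
  let st := provenance.foldl pvStepA (0, 0, 0, 0)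
  [("delta_routes_pure_assign_only", st.1),
   ("delta_routes_mixed_only", st.2.1),
   ("delta_routes_with_both_pure_and_mixed", st.2.2.1),
   ("delta_routes_struct_only_unexpected", st.2.2.2)]

-- ===== PORT B =====
-- port of B: per-row flag triples, then four independent predicate counts
def decomposition_summary_py_alt (provenance : List (List (String × Int))) : List (String × Int) :=
  let flags := provenance.map (fun row =>
    (pvTruthy row "any_pure_assign_program",
     pvTruthy row "any_mixed_program",
     pvTruthy row "any_pure_struct_program"))
  [("delta_routes_pure_assign_only", (flags.countP (fun f => f.1 && !f.2.1) : Int)),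
   ("delta_routes_mixed_only", (flags.countP (fun f => f.2.1 && !f.1) : Int)),
   ("delta_routes_with_both_pure_and_mixed", (flags.countP (fun f => f.1 && f.2.1) : Int)),
   ("delta_routes_struct_only_unexpected", (flags.countP (fun f => f.2.2 && !f.1 && !f.2.1) : Int))]

-- ===== PRECONDITION & SPEC =====
def Spec_decomposition_summary_py (provenance : List (List (String × Int))) (out : List (String × Int)) : Prop := out = decomposition_summary_py_alt provenance
instance (provenance : List (List (String × Int))) (out : List (String × Int)) : Decidable (Spec_decomposition_summary_py provenance out) := by unfold Spec_decomposition_summary_py; infer_instance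

-- ===== CLAIM =====
def Claim_equal_decomposition_summary_py : Prop := ∀ (provenance : List (List (String × Int))), Dom_decomposition_summary_py provenance → Spec_decomposition_summary_py provenance (decomposition_summary_py provenance)

-- ===== LEMMAS AND PROOFS =====
-- loop invariant: A's four counters are the accumulators plus B's four independent counts of the rest
theorem pv_fold_counts (l : List (List (String × Int))) (a b c d : Int) :
    l.foldl pvStepA (a, b, c, d)
    = (a + (l.countP (fun row => pvTruthy row "any_pure_assign_program" && !pvTruthy row "any_mixed_program") : Int),
       b + (l.countP (fun row => pvTruthy row "any_mixed_program" && !pvTruthy row "any_pure_assign_program") : Int),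
       c + (l.countP (fun row => pvTruthy row "any_pure_assign_program" && pvTruthy row "any_mixed_program") : Int),
       d + (l.countP (fun row => pvTruthy row "any_pure_struct_program" && !pvTruthy row "any_pure_assign_program" && !pvTruthy row "any_mixed_program") : Int)) := by
  induction l generalizing a b c d with
  | nil => simp
  | cons row rest ih =>
    rw [List.foldl_cons]
    have hstep : ∀ st : Int × Int × Int × Int, pvStepA st row =
        (st.1, st.2.1, st.2.2.1, st.2.2.2) +
          (if pvTruthy row "any_pure_assign_program" && !pvTruthy row "any_mixed_program" then (1,0,0,0)
           else if pvTruthy row "any_mixed_program" && !pvTruthy row "any_pure_assign_program" then (0,1,0,0)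
           else if pvTruthy row "any_pure_assign_program" && pvTruthy row "any_mixed_program" then (0,0,1,0)
           else if pvTruthy row "any_pure_struct_program" then (0,0,0,1)
           else (0,0,0,0)) := by
      intro st
      cases hpa : pvTruthy row "any_pure_assign_program" <;>
        cases hmx : pvTruthy row "any_mixed_program" <;>
        cases hps : pvTruthy row "any_pure_struct_program" <;>
        simp [pvStepA, hpa, hmx, hps, Prod.ext_iff]
    rw [hstep, ih]
    simp only [List.countP_cons]
    cases hpa : pvTruthy row "any_pure_assign_program" <;>
      cases hmx : pvTruthy row "any_mixed_program" <;>
      cases hps : pvTruthy row "any_pure_struct_program" <;>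
      simp [Prod.ext_iff] <;> omega

-- ===== VERDICT =====
theorem decomposition_summary_py_spec : Claim_equal_decomposition_summary_py := by
  intro provenance _
  unfold Spec_decomposition_summary_py decomposition_summary_py decomposition_summary_py_alt
  rw [pv_fold_counts]
  simp [List.countP_map, Function.comp_def]
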